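-- pv_equiv track=rewrite | github.com/Thunno/Thunno2 | src/build/lib/thunno2/helpers.py | cumsum
-- ===== SOURCE A (Python) =====
-- def it_sum(lst):
--     if not lst:
--         return 0
--     if all(isinstance(item, (int, float)) for item in lst):
--         return sum(lst)
--     if all(isinstance(item, list) for item in lst):
--         return sum(lst[1:], lst[0])
--     return "".join(map(str, lst))
--
-- def cumsum(l):
--     if any(not isinstance(i, (int, float)) for i in l):
--         if not all(isinstance(j, list) for j in l):
--             l = [*map(str, l)]
--     if not l:
--         return []
--     r = []
--     for i in range(1, len(l) + 1):
--         r.append(it_sum(l[:i]))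
--     return r
-- ===== SOURCE B (Python) =====
-- def cumsum(l):
--     r = []
--     acc = 0
--     for x in l:
--         acc += x
--         r.append(acc)
--     return r
-- ===== Notes on version B (the rewrite author's own statement) =====
-- stated objective: faster
-- what changed: Replaces re-summing every prefix slice (and the it_sum type dispatch) with a single pass keeping a running sum.
import Mathlib
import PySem

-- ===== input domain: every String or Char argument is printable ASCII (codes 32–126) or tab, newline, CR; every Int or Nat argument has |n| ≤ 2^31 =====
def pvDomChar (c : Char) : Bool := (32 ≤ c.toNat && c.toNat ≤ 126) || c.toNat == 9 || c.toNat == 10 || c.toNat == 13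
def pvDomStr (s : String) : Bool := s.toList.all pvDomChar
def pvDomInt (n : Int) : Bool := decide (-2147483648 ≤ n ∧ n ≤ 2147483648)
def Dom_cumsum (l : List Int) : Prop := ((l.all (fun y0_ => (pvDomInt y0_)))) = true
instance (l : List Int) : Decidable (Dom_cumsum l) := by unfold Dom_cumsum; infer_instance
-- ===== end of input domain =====

-- B replaces A's re-summing of every prefix slice with one pass keeping a running sum (O(n) vs O(n^2)).

-- ===== PORT A =====
-- it_sum on a List Int: the 'not lst' branch returns 0, the all-int branch returns sum(lst);
-- the list/str branches are type dispatch that can never fire on Int elements.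
def it_sum (lst : List Int) : Int :=
  if lst = [] then 0 else lst.foldl (· + ·) 0

-- In cumsum, 'any not isinstance(i,(int,float))' is always False on a List Int,
-- so the map-str rebinding never runs; the rest is ported step for step.
def cumsum (l : List Int) : List Int :=
  if l = [] then []
  else
    (PySem.List.pyRange 1 ((l.length : Int) + 1) 1).foldl
      (fun r i => r ++ [it_sum (PySem.List.slice l none (some i))]) []

-- ===== PORT B =====
def cumsumGo (acc : Int) : List Int → List Int
  | [] => []
  | x :: xs => (acc + x) :: cumsumGo (acc + x) xs

def cumsum_alt (l : List Int) : List Int := cumsumGo 0 l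

-- ===== PRECONDITION & SPEC =====
def Spec_cumsum (l : List Int) (out : List Int) : Prop := out = cumsum_alt l
instance (l : List Int) (out : List Int) : Decidable (Spec_cumsum l out) := by unfold Spec_cumsum; infer_instance

-- ===== CLAIM (what is proved, stated in full; the proofs are below) =====
def Claim_equal_cumsum : Prop := ∀ (l : List Int), Dom_cumsum l → Spec_cumsum l (cumsum l)

-- ===== LEMMAS AND PROOFS =====

theorem cumsumGo_eq (l : List Int) : ∀ acc : Int,
    cumsumGo acc l = (List.range l.length).map (fun k => acc + (l.take (k + 1)).sum) := by
  induction l with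
  | nil => intro acc; simp [cumsumGo]
  | cons x xs ih =>
    intro acc
    simp only [cumsumGo, List.length_cons, List.range_succ_eq_map, List.map_cons,
      List.map_map, ih (acc + x)]
    refine List.cons_eq_cons.mpr ⟨by simp, ?_⟩
    apply List.map_congr_left
    intro k _
    simp [List.take_succ_cons, add_assoc]

theorem cumsum_eq (l : List Int) :
    cumsum l = (List.range l.length).map (fun k => (l.take (k + 1)).sum) := by
  unfold cumsum
  by_cases h : l = []
  · simp [h]
  · rw [if_neg h]
    rw [PySem.List.foldl_append_singleton_eq_map]
    rw [show ((l.length : Int) + 1) = ((l.length + 1 : Nat) : Int) by push_cast; ring]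
    rw [PySem.List.pyRange_one]
    simp only [List.map_map, List.nil_append]
    rw [show ((l.length + 1 : Nat) : Int) - 1 = (l.length : Int) by push_cast; ring, Int.toNat_natCast]
    apply List.map_congr_left
    intro k hk
    simp only [List.mem_range] at hk
    have h1 : (1 : Int) + (k : Int) = ((k + 1 : Nat) : Int) := by push_cast; ring
    simp only [Function.comp_apply, h1, PySem.List.slice_to_natCast]
    have hne : l.take (k + 1) ≠ [] := by
      simp [List.take_eq_nil_iff, h]
    rw [it_sum, if_neg hne]
    rw [List.sum_eq_foldl]

-- ===== VERDICT (by name: the statement is the Claim_ definition above) =====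
theorem cumsum_spec : Claim_equal_cumsum := by
  intro l _
  unfold Spec_cumsum cumsum_alt
  rw [cumsum_eq, cumsumGo_eq]
  simp
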